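-- pv_equiv track=rewrite | github.com/khj1998/ProblemSolving | 프로그래머스/2/389479. 서버 증설 횟수/서버 증설 횟수.py | solution
-- ===== SOURCE A (Python) =====
-- import math
--
-- def solution(players, m, k):
--     answer = 0
--     now_server_num = [0 for _ in range(len(players))]
--
--     def is_over_player(player_num,server_num):
--         return (server_num + 1) * m <= player_num
--
--     def calculate_increased_server_num(player_num,server_num) :
--         need_server_num = math.floor(player_num/m)
--         return need_server_num - server_num
--
--     for i in range(len(players)):
--         if is_over_player(players[i],now_server_num[i]):
--             more_server = calculate_increased_server_num(players[i],now_server_num[i])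
--             answer += more_server
--
--             for j in range(i,i + k):
--                 if j >= 24:
--                     break
--                 now_server_num[j] += more_server
--
--     return answer
-- ===== SOURCE B (Python) =====
-- def solution(players, m, k):
--     n = len(players)
--     answer = 0
--     current = 0            # servers active in the current hour
--     diff = [0] * n         # difference array: diff[t] is applied when hour t starts
--     for i in range(n):
--         current += diff[i]
--         if (current + 1) * m <= players[i]:
--             need = players[i] // m - current
--             answer += need
--             end = min(i + k, 24)
--             if end > i:            # the rented window is non-empty
--                 current += need
--                 if end < n:        # schedule expiry inside the horizon
--                     diff[end] -= need
--     return answer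
-- ===== Notes on version B (the rewrite author's own statement) =====
-- stated objective: faster
-- what changed: Replaces A's per-hour server array with nested window-writing loops by a single linear pass keeping one running counter plus a difference array in which each rental's expiry is scheduled once (removes the inner min(k,24)-wide write loop).
-- outside the precondition, e.g. on solution([5], 1, 3): A raises IndexError, B returns 5; on solution([1], 0, 1): A raises ZeroDivisionError, B raises ZeroDivisionError; on solution([-1], 0, 1): A returns 0, B returns 0
import Mathlib
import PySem

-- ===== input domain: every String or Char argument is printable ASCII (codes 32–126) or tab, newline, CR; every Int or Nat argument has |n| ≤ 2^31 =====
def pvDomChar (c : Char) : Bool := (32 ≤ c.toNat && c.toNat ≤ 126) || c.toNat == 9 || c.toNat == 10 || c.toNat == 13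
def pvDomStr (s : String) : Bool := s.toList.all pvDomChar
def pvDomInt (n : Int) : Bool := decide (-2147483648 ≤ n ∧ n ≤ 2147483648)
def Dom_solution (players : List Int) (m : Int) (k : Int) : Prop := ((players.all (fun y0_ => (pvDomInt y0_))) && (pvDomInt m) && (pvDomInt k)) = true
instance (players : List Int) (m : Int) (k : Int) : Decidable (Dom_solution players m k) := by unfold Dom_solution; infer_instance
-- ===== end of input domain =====

-- B replaces A's nested window-writing loops with one linear pass over a difference array;
-- the equivalence is about the RETURN value (A also mutates only its own local list).
-- math.floor(p/m) in A is ported as integer floor division: exact on Dom (|values| ≤ 2^31,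
-- the rounded double quotient never crosses an integer there).

-- ===== PORT A =====
-- inner 'for j in range(i, i+k): if j >= 24: break; now_server_num[j] += more'
def pvInnerA (ns : List Int) (j : Nat) (stop : Int) (more : Int) : List Int :=
  if h : (j : Int) < stop then
    if 24 ≤ j then ns
    else pvInnerA (ns.set j (ns.getD j 0 + more)) (j + 1) stop more
  else ns
termination_by (stop - (j : Int)).toNat
decreasing_by omega

def pvIsOver (m player_num server_num : Int) : Bool := decide ((server_num + 1) * m ≤ player_num)

def pvCalcInc (m player_num server_num : Int) : Int := PySem.Int.floordiv player_num m - server_num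

-- one iteration of A's outer loop, state = (answer, now_server_num)
def pvStepA (players : List Int) (m k : Int) (st : Int × List Int) (i : Nat) : Int × List Int :=
  if pvIsOver m (players.getD i 0) (st.2.getD i 0) then
    let more := pvCalcInc m (players.getD i 0) (st.2.getD i 0)
    (st.1 + more, pvInnerA st.2 i ((i : Int) + k) more)
  else st

def solution (players : List Int) (m : Int) (k : Int) : Int :=
  ((List.range players.length).foldl (pvStepA players m k) (0, List.replicate players.length 0)).1

-- ===== PORT B =====
-- one iteration of B's loop, state = (answer, current, diff)
def pvStepB (players : List Int) (m k : Int) (st : Int × Int × List Int) (i : Nat) : Int × Int × List Int :=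
  let cur := st.2.1 + st.2.2.getD i 0
  if (cur + 1) * m ≤ players.getD i 0 then
    let need := PySem.Int.floordiv (players.getD i 0) m - cur
    let e := min ((i : Int) + k) 24
    if (i : Int) < e then
      if e < (players.length : Int) then
        (st.1 + need, cur + need, st.2.2.set e.toNat (st.2.2.getD e.toNat 0 - need))
      else (st.1 + need, cur + need, st.2.2)
    else (st.1 + need, cur, st.2.2)
  else (st.1, cur, st.2.2)

def solution_alt (players : List Int) (m : Int) (k : Int) : Int :=
  ((List.range players.length).foldl (pvStepB players m k) (0, 0, List.replicate players.length 0)).1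

-- ===== PRECONDITION & SPEC =====
-- A can raise mid-run: ZeroDivisionError when m = 0 and the provisioning branch fires, and
-- IndexError when a fired window runs past the end of a list shorter than the problem's
-- guaranteed 24 hours; whether A raises there depends on run state, so Pre_ keeps the inputs
-- where A is guaranteed safe (a full 24-hour list, an empty window k <= 1, or demand below m
-- in the last k-1 hours so no window can overrun) and leaves the state-dependent remainder of
-- the short-list corner outside the claim even though A returns on part of it -- B returns A's
-- exact value on every such returning run (e.g. ([9,0,5],1,3) -> 9), and the equivalence proof
-- below does not use Pre_ at all: it exists only to keep Python A's exceptions out of scope.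
def Pre_solution (players : List Int) (m : Int) (k : Int) : Prop :=
  m ≠ 0 ∧ (24 ≤ players.length ∨ k ≤ 1 ∨
    (0 < m ∧ ∀ i ∈ List.range players.length,
      (players.length : Int) < (i : Int) + k → players.getD i 0 < m))
instance (players : List Int) (m : Int) (k : Int) : Decidable (Pre_solution players m k) := by
  unfold Pre_solution; infer_instance

def pvWitness_solution : List Int × Int × Int :=
  ([10, 0, 0, 0, 5, 0, 0, 0, 0, 0, 3, 3, 0, 0, 1, 0, 0, 0, 0, 7, 0, 0, 0, 2], 2, 5)

def Spec_solution (players : List Int) (m : Int) (k : Int) (out : Int) : Prop := out = solution_alt players m k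
instance (players : List Int) (m : Int) (k : Int) (out : Int) : Decidable (Spec_solution players m k out) := by unfold Spec_solution; infer_instance

-- ===== CLAIM (what is proved, stated in full; the proofs are below) =====
def Claim_equal_solution : Prop := ∀ (players : List Int) (m : Int) (k : Int), Dom_solution players m k → Pre_solution players m k → Spec_solution players m k (solution players m k)

-- ===== LEMMAS AND PROOFS =====

theorem pvInnerA_length (ns : List Int) (j : Nat) (stop more : Int) :
    (pvInnerA ns j stop more).length = ns.length := by
  fun_induction pvInnerA ns j stop more with
  | case1 ns j h h24 => rfl
  | case2 ns j h h24 ih => simpa using ih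
  | case3 ns j h => rfl

theorem pvInnerA_getD (ns : List Int) (j : Nat) (stop more : Int) (t : Nat) (ht : t < ns.length) :
    (pvInnerA ns j stop more).getD t 0 =
      ns.getD t 0 + (if j ≤ t ∧ (t : Int) < stop ∧ t < 24 then more else 0) := by
  fun_induction pvInnerA ns j stop more with
  | case1 ns j h h24 =>
      have : ¬ (j ≤ t ∧ (t : Int) < stop ∧ t < 24) := by omega
      simp [this]
  | case2 ns j h h24 ih =>
      rw [ih (by simpa using ht)]
      by_cases hjt : t = j
      · subst hjt
        have h2 : (t ≤ t ∧ (t : Int) < stop ∧ t < 24) := by omega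
        simp [h2, List.getD_eq_getElem?_getD, List.getElem?_set_self ht]
      · have heq : (j + 1 ≤ t ∧ (t : Int) < stop ∧ t < 24) ↔ (j ≤ t ∧ (t : Int) < stop ∧ t < 24) := by
          omega
        rw [List.getD_eq_getElem?_getD, List.getElem?_set_ne (by omega), ← List.getD_eq_getElem?_getD]
        simp only [heq]
  | case3 ns j h =>
      have : ¬ (j ≤ t ∧ (t : Int) < stop ∧ t < 24) := by omega
      simp [this]

-- simulation relation between A's state and B's state before processing hour i
def pvInv (n i : Nat) (sa : Int × List Int) (sb : Int × Int × List Int) : Prop :=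
  sa.1 = sb.1 ∧ sa.2.length = n ∧ sb.2.2.length = n ∧
  ∀ j, i ≤ j → j < n →
    sa.2.getD j 0 = sb.2.1 + ∑ t ∈ Finset.Ico i (j + 1), sb.2.2.getD t 0

theorem sum_getD_set (l : List Int) (e : Nat) (v : Int) (a b : Nat) (he : e < l.length) :
    ∑ t ∈ Finset.Ico a b, (l.set e v).getD t 0 =
      (∑ t ∈ Finset.Ico a b, l.getD t 0) + (if e ∈ Finset.Ico a b then v - l.getD e 0 else 0) := by
  have hpt : ∀ t, (l.set e v).getD t 0 = l.getD t 0 + (if t = e then v - l.getD e 0 else 0) := by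
    intro t
    by_cases hte : t = e
    · subst hte; simp [List.getD_eq_getElem?_getD, List.getElem?_set_self he]
    · simp [List.getD_eq_getElem?_getD, List.getElem?_set_ne (by omega : e ≠ t), hte]
  calc ∑ t ∈ Finset.Ico a b, (l.set e v).getD t 0
      = ∑ t ∈ Finset.Ico a b, (l.getD t 0 + (if t = e then v - l.getD e 0 else 0)) := by
        exact Finset.sum_congr rfl (fun t _ => hpt t)
    _ = _ := by
        rw [Finset.sum_add_distrib, Finset.sum_ite_eq' (Finset.Ico a b) e (fun _ => v - l.getD e 0)]

theorem pvStep_inv (players : List Int) (m k : Int) (i : Nat) (sa : Int × List Int)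
    (sb : Int × Int × List Int) (hi : i < players.length)
    (h : pvInv players.length i sa sb) :
    pvInv players.length (i + 1) (pvStepA players m k sa i) (pvStepB players m k sb i) := by
  obtain ⟨hans, hla, hlb, hinv⟩ := h
  have hcur : sa.2.getD i 0 = sb.2.1 + sb.2.2.getD i 0 := by
    have := hinv i (le_refl i) hi
    rwa [Finset.sum_eq_sum_Ico_succ_bot (by omega) _, Finset.Ico_self, Finset.sum_empty, add_zero] at this
  have hsplit : ∀ j, i + 1 ≤ j → j < players.length →
      sa.2.getD j 0 = (sb.2.1 + sb.2.2.getD i 0) + ∑ t ∈ Finset.Ico (i + 1) (j + 1), sb.2.2.getD t 0 := by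
    intro j hj1 hj2
    have := hinv j (by omega) hj2
    rwa [Finset.sum_eq_sum_Ico_succ_bot (by omega) _, ← add_assoc] at this
  unfold pvStepA pvStepB pvIsOver pvCalcInc
  rw [hcur]
  by_cases hfire : (sb.2.1 + sb.2.2.getD i 0 + 1) * m ≤ players.getD i 0
  · rw [if_pos (by exact decide_eq_true hfire), if_pos hfire]
    by_cases hie : (i : Int) < min ((i : Int) + k) 24
    · by_cases hen : min ((i : Int) + k) 24 < (players.length : Int)
      · -- window nonempty, expiry inside the horizon
        rw [if_pos hie, if_pos hen]
        refine ⟨by simp [hans], by simp [pvInnerA_length, hla], by simp [hlb], ?_⟩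
        intro j hj1 hj2
        have het : (min ((i : Int) + k) 24).toNat < sb.2.2.length := by omega
        simp only
        rw [pvInnerA_getD _ _ _ _ j (by omega), sum_getD_set _ _ _ _ _ het,
            hsplit j hj1 hj2]
        have hmem : (min ((i : Int) + k) 24).toNat ∈ Finset.Ico (i + 1) (j + 1) ↔
            min ((i : Int) + k) 24 ≤ (j : Int) := by
          simp only [Finset.mem_Ico]; omega
        by_cases hje : (j : Int) < min ((i : Int) + k) 24
        · have hc : (i ≤ j ∧ (j : Int) < (i : Int) + k ∧ j < 24) := by omega
          have hnm : ¬ (min ((i : Int) + k) 24).toNat ∈ Finset.Ico (i + 1) (j + 1) := by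
            rw [hmem]; omega
          rw [if_pos hc, if_neg hnm]
          ring
        · have hc : ¬ (i ≤ j ∧ (j : Int) < (i : Int) + k ∧ j < 24) := by omega
          have hm : (min ((i : Int) + k) 24).toNat ∈ Finset.Ico (i + 1) (j + 1) := by
            rw [hmem]; omega
          rw [if_neg hc, if_pos hm]
          ring
      · -- window nonempty, never expires inside the horizon
        rw [if_pos hie, if_neg hen]
        refine ⟨by simp [hans], by simp [pvInnerA_length, hla], by simp [hlb], ?_⟩
        intro j hj1 hj2
        simp only
        rw [pvInnerA_getD _ _ _ _ j (by omega), hsplit j hj1 hj2]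
        have hc : (i ≤ j ∧ (j : Int) < (i : Int) + k ∧ j < 24) := by omega
        rw [if_pos hc]
        ring
    · -- empty window: A writes nothing, B keeps current
      rw [if_neg hie]
      refine ⟨by simp [hans], by simp [pvInnerA_length, hla], by simp [hlb], ?_⟩
      intro j hj1 hj2
      simp only
      rw [pvInnerA_getD _ _ _ _ j (by omega), hsplit j hj1 hj2]
      have hc : ¬ (i ≤ j ∧ (j : Int) < (i : Int) + k ∧ j < 24) := by omega
      rw [if_neg hc]
      ring
  · rw [if_neg (by simpa using hfire), if_neg hfire]
    exact ⟨hans, hla, by simp [hlb], fun j hj1 hj2 => by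
      simp only; rw [hsplit j hj1 hj2]⟩

theorem pvFold_eq (players : List Int) (m k : Int) :
    ∀ (len i : Nat) (sa : Int × List Int) (sb : Int × Int × List Int),
      i + len ≤ players.length → pvInv players.length i sa sb →
      ((List.range' i len).foldl (pvStepA players m k) sa).1 =
      ((List.range' i len).foldl (pvStepB players m k) sb).1 := by
  intro len
  induction len with
  | zero => intro i sa sb _ h; exact h.1
  | succ len ih =>
      intro i sa sb hle h
      rw [List.range'_succ, List.foldl_cons, List.foldl_cons]
      exact ih (i + 1) _ _ (by omega) (pvStep_inv players m k i sa sb (by omega) h)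

-- ===== VERDICT (by name: the statement is the Claim_ definition above) =====
theorem solution_spec : Claim_equal_solution := by
  intro players m k _ _
  unfold Spec_solution solution solution_alt
  rw [List.range_eq_range']
  refine pvFold_eq players m k players.length 0 _ _ (by omega) ?_
  refine ⟨rfl, by simp, by simp, ?_⟩
  intro j _ hj
  simp only [List.getD_eq_getElem?_getD, List.getElem?_replicate]
  rw [if_pos hj, Option.getD_some, zero_add]
  refine (Finset.sum_eq_zero (fun x _ => ?_)).symm
  by_cases h : x < players.length
  · rw [if_pos h]; rfl
  · rw [if_neg h]; rfl
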